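-- pv_equiv track=rewrite | github.com/SinlessRook/localmind | backend/server.py | _is_metadata_query
-- ===== SOURCE A (Python) =====
-- def _is_metadata_query(message: str) -> bool:
--     m = (message or "").lower()
--     probes = [
--         "when", "date", "visited", "visit", "time", "spent", "how long",
--         "last", "first", "timeline", "history", "day", "today", "yesterday",
--         "where did", "where can", "list link", "links to", "show link",
--     ]
--     return any(p in m for p in probes)
-- ===== SOURCE B (Python) =====
-- _PROBES = (
--     "when", "date", "visited", "visit", "time", "spent", "how long",
--     "last", "first", "timeline", "history", "day", "today", "yesterday",
--     "where did", "where can", "list link", "links to", "show link",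
-- )
--
-- def _is_metadata_query(message: str) -> bool:
--     s = (message or "").lower()
--     i = 0
--     while True:
--         for p in _PROBES:
--             if s.startswith(p, i):
--                 return True
--         if i >= len(s):
--             return False
--         i += 1
-- ===== Notes on version B (the rewrite author's own statement) =====
-- stated objective: alternative
-- what changed: Replaced the probe-major loop that runs one full substring scan of the message per probe by a position-major walk: a single cursor advances through the message and at each position every probe is tested as a prefix, returning as soon as one matches.
import Mathlib
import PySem

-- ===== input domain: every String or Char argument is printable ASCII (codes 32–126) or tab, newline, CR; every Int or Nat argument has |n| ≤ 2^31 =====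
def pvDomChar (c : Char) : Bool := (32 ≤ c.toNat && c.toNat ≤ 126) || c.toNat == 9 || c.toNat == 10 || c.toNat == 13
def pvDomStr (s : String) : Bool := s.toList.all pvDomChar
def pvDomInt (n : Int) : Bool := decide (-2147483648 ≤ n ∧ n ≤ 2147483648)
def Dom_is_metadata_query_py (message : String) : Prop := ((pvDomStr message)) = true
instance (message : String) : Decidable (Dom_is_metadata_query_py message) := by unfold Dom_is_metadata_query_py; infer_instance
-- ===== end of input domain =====

-- B replaces A's probe-major repeated substring scans by a single cursor walk of the
-- message that tests each probe as a prefix at every position (alternative decomposition, same cost).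


-- ===== PORT A =====
-- the probe list, shared verbatim by both programs
def pvProbes : List String :=
  ["when", "date", "visited", "visit", "time", "spent", "how long",
   "last", "first", "timeline", "history", "day", "today", "yesterday",
   "where did", "where can", "list link", "links to", "show link"]

def is_metadata_query_py (message : String) : Bool :=
  -- m = (message or "").lower(); '' is the only falsy string
  let m := PySem.Str.lower (if message = "" then "" else message)
  -- any(p in m for p in probes)
  pvProbes.any (fun p => PySem.Str.isIn p m)

-- ===== PORT B =====
-- the while-loop of Source B with cursor i: s.startswith(p, i) with 0 ≤ i is exactly
-- 'p is a prefix of s[i:]' (the inner for-loop is the .any); stop with False once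
-- i has passed the end, else advance the cursor
def pvScan (s : List Char) (i : Nat) : Bool :=
  if pvProbes.any (fun p => PySem.Chars.startswith (s.drop i) p.toList) then true
  else if s.length ≤ i then false
  else pvScan s (i + 1)
termination_by s.length - i

def is_metadata_query_py_alt (message : String) : Bool :=
  let s := PySem.Str.lower (if message = "" then "" else message)
  pvScan s.toList 0

-- ===== PRECONDITION & SPEC =====
def Spec_is_metadata_query_py (message : String) (out : Bool) : Prop := out = is_metadata_query_py_alt message
instance (message : String) (out : Bool) : Decidable (Spec_is_metadata_query_py message out) := by unfold Spec_is_metadata_query_py; infer_instance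

-- ===== CLAIM (what is proved, stated in full; the proofs are below) =====
def Claim_equal_is_metadata_query_py : Prop := ∀ (message : String), Dom_is_metadata_query_py message → Spec_is_metadata_query_py message (is_metadata_query_py message)

-- ===== LEMMAS AND PROOFS =====

-- no probe is the empty string
theorem pv_probes_ne (p : String) (hp : p ∈ pvProbes) : p.toList ≠ [] := by
  fin_cases hp <;> decide

-- the cursor walk from i finds exactly the occurrences at positions ≥ i
theorem pv_scan_iff (s : List Char) (i : Nat) :
    pvScan s i = true ↔ ∃ j, ∃ p ∈ pvProbes, p.toList <+: s.drop (i + j) := by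
  rw [pvScan]
  split_ifs with hhit hend
  · simp only [List.any_eq_true, PySem.Chars.startswith_iff] at hhit
    obtain ⟨p, hp, hpre⟩ := hhit
    exact iff_of_true rfl ⟨0, p, hp, by simpa using hpre⟩
  · apply iff_of_false (by simp)
    rintro ⟨j, p, hp, hpre⟩
    have hnil : s.drop (i + j) = [] := List.drop_eq_nil_of_le (by omega)
    rw [hnil] at hpre
    exact pv_probes_ne p hp (List.prefix_nil.mp hpre)
  · rw [pv_scan_iff s (i + 1)]
    constructor
    · rintro ⟨j, p, hp, hpre⟩
      exact ⟨j + 1, p, hp, by simpa [Nat.add_assoc, Nat.add_comm 1 j] using hpre⟩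
    · rintro ⟨j, p, hp, hpre⟩
      cases j with
      | zero =>
        exfalso
        exact hhit (List.any_eq_true.mpr
          ⟨p, hp, (PySem.Chars.startswith_iff _ _).mpr (by simpa using hpre)⟩)
      | succ j =>
        exact ⟨j, p, hp, by simpa [Nat.add_assoc, Nat.add_comm 1 j] using hpre⟩
termination_by s.length - i

theorem pv_core (m : List Char) :
    pvProbes.any (fun p => PySem.Chars.isIn p.toList m) = pvScan m 0 := by
  rw [Bool.eq_iff_iff, pv_scan_iff]
  simp only [List.any_eq_true, Nat.zero_add]
  constructor
  · rintro ⟨p, hp, hin⟩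
    obtain ⟨j, hj⟩ := (PySem.Chars.exists_prefix_drop_iff_isIn _ _).mpr hin
    exact ⟨j, p, hp, hj⟩
  · rintro ⟨j, p, hp, hpre⟩
    exact ⟨p, hp, (PySem.Chars.exists_prefix_drop_iff_isIn _ _).mp ⟨j, hpre⟩⟩

-- ===== VERDICT (by name: the statement is the Claim_ definition above) =====
theorem is_metadata_query_py_spec : Claim_equal_is_metadata_query_py := by
  intro message _
  unfold Spec_is_metadata_query_py is_metadata_query_py is_metadata_query_py_alt
  simp only [PySem.Str.isIn_eq]
  exact pv_core _
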